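-- pv_equiv track=rewrite | github.com/MrHuangKong/CS330-Planner-Project | app_project/courseInput.py | checkDays
-- ===== SOURCE A (Python) =====
-- def checkDays(newDays: list, savedDays: list) -> bool:
--     """
--     Check if any of the new days overlap with our existing saved days in the database
--     :param newDays: List of days that a new course has
--     :param savedDays: List of days that a saved course has
--     :return: Return True if we have a days overlap, false if not
--     """
--     dayOverlap = False
--     for i in zip(newDays, savedDays):
--         # If we have a match for the days, return True
--         if i[0] == i[1] and i[0] == 1:
--             dayOverlap = True
--             break
--         else:  # No class day matches
--             pass
--     return dayOverlap
-- ===== SOURCE B (Python) =====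
-- def checkDays(newDays: list, savedDays: list) -> bool:
--     """Idiomatic rewrite: collect the indices marked 1 in each list and test
--     whether the two index sets intersect (zip truncation = indices beyond the
--     shorter list never appear in both sets)."""
--     newSet = {i for i, d in enumerate(newDays) if d == 1}
--     savedSet = {i for i, d in enumerate(savedDays) if d == 1}
--     return bool(newSet & savedSet)
-- ===== Notes on version B (the rewrite author's own statement) =====
-- stated objective: idiomatic
-- what changed: Replaces the single zipped early-exit loop with two independent index-collecting set comprehensions followed by a set-intersection non-emptiness test.
import Mathlib
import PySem

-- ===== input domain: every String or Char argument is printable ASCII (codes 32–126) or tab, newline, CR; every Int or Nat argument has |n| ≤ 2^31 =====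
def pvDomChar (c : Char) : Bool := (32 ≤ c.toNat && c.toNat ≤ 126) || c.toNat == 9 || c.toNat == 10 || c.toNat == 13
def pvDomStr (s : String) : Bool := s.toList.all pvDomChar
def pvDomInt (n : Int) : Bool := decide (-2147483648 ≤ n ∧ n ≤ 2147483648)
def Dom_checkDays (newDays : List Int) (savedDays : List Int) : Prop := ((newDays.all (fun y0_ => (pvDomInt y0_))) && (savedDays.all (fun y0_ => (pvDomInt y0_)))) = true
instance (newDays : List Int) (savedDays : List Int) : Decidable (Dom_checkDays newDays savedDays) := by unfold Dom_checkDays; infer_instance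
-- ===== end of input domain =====

-- B replaces A's zipped early-exit loop by two index-set comprehensions and a
-- set-intersection non-emptiness test (objective: idiomatic; return value only).

-- ===== PORT A =====
-- the 'for i in zip(...)' loop with its early break (dayOverlap stays False until the break)
def checkDaysLoop : List (Int × Int) → Bool
  | [] => false
  | i :: rest => if i.1 == i.2 && i.1 == 1 then true else checkDaysLoop rest

def checkDays (newDays : List Int) (savedDays : List Int) : Bool :=
  checkDaysLoop (newDays.zip savedDays)

-- ===== PORT B =====
-- {i for i, d in enumerate(days) if d == 1}
def checkDaysIdxSet (days : List Int) : PySem.Set Int :=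
  PySem.Set.ofList (((PySem.List.enumerate days 0).filter (fun p => p.2 == 1)).map (fun p => p.1))

def checkDays_alt (newDays : List Int) (savedDays : List Int) : Bool :=
  !(PySem.Set.inter (checkDaysIdxSet newDays) (checkDaysIdxSet savedDays)).isEmpty

-- ===== PRECONDITION & SPEC =====
def Spec_checkDays (newDays : List Int) (savedDays : List Int) (out : Bool) : Prop := out = checkDays_alt newDays savedDays
instance (newDays : List Int) (savedDays : List Int) (out : Bool) : Decidable (Spec_checkDays newDays savedDays out) := by unfold Spec_checkDays; infer_instance

-- ===== CLAIM (what is proved, stated in full; the proofs are below) =====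
def Claim_equal_checkDays : Prop := ∀ (newDays : List Int) (savedDays : List Int), Dom_checkDays newDays savedDays → Spec_checkDays newDays savedDays (checkDays newDays savedDays)

-- ===== LEMMAS AND PROOFS =====

-- A's loop returns true iff some zipped pair matches with value 1
theorem checkDaysLoop_iff (l : List (Int × Int)) :
    checkDaysLoop l = true ↔ ∃ p ∈ l, p.1 = p.2 ∧ p.1 = 1 := by
  induction l with
  | nil => simp [checkDaysLoop]
  | cons x t ih =>
    obtain ⟨a, b⟩ := x
    by_cases h : a = b ∧ a = 1
    · obtain ⟨rfl, rfl⟩ := h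
      simp [checkDaysLoop]
    · have hc : (a == b && a == 1) = false := by
        rcases not_and_or.mp h with h1 | h1 <;> simp [h1]
      simp only [checkDaysLoop, hc, Bool.false_eq_true, if_false, ih]
      constructor
      · rintro ⟨p, hp, he⟩; exact ⟨p, List.mem_cons_of_mem _ hp, he⟩
      · rintro ⟨p, hp, he⟩
        rcases List.mem_cons.mp hp with rfl | hp'
        · exact absurd he h
        · exact ⟨p, hp', he⟩

-- membership in B's comprehension set
theorem mem_checkDaysIdxSet (days : List Int) (i : Int) :
    i ∈ checkDaysIdxSet days ↔ ∃ k : Nat, ∃ h : k < days.length, days[k] = 1 ∧ i = (k : Int) := by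
  simp only [checkDaysIdxSet, PySem.Set.mem_ofList, List.mem_map, List.mem_filter,
    PySem.List.mem_enumerate_iff]
  constructor
  · rintro ⟨p, ⟨⟨k, hk, rfl⟩, hd⟩, rfl⟩
    exact ⟨k, hk, by simpa using hd, by simp⟩
  · rintro ⟨k, hk, hd, rfl⟩
    exact ⟨((k : Int), days[k]), ⟨⟨k, hk, by simp⟩, by simpa using hd⟩, rfl⟩

theorem checkDays_eq_alt (newDays savedDays : List Int) :
    checkDays newDays savedDays = checkDays_alt newDays savedDays := by
  rw [Bool.eq_iff_iff]
  simp only [checkDays, checkDays_alt, Bool.not_eq_eq_eq_not, Bool.not_true,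
    List.isEmpty_eq_false_iff_exists_mem, checkDaysLoop_iff]
  constructor
  · rintro ⟨p, hp, h1, h2⟩
    obtain ⟨k, hk⟩ := List.mem_iff_getElem?.mp hp
    obtain ⟨ha, hb⟩ := List.getElem?_zip_eq_some.mp hk
    have hka : k < newDays.length := by
      by_contra h; exact absurd ha (by simp [List.getElem?_eq_none (by omega : newDays.length ≤ k)])
    have hkb : k < savedDays.length := by
      by_contra h; exact absurd hb (by simp [List.getElem?_eq_none (by omega : savedDays.length ≤ k)])
    refine ⟨(k : Int), (PySem.Set.mem_inter _ _ _).mpr ⟨?_, ?_⟩⟩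
    · exact (mem_checkDaysIdxSet _ _).mpr ⟨k, hka, by
        have := List.getElem?_eq_getElem hka ▸ ha; simp_all, rfl⟩
    · exact (mem_checkDaysIdxSet _ _).mpr ⟨k, hkb, by
        have := List.getElem?_eq_getElem hkb ▸ hb; simp_all [← h1], rfl⟩
  · rintro ⟨i, hi⟩
    obtain ⟨h1, h2⟩ := (PySem.Set.mem_inter _ _ _).mp hi
    obtain ⟨k1, hka, hva, rfl⟩ := (mem_checkDaysIdxSet _ _).mp h1
    obtain ⟨k2, hkb, hvb, hkk⟩ := (mem_checkDaysIdxSet _ _).mp h2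
    have hk' : k2 = k1 := by exact_mod_cast hkk.symm
    subst hk'
    refine ⟨(newDays[k2], savedDays[k2]), ?_, by simp [hva, hvb]⟩
    exact List.mem_iff_getElem?.mpr ⟨k2, List.getElem?_zip_eq_some.mpr
      ⟨List.getElem?_eq_getElem hka, List.getElem?_eq_getElem hkb⟩⟩

-- ===== VERDICT (by name: the statement is the Claim_ definition above) =====
theorem checkDays_spec : Claim_equal_checkDays := by
  intro newDays savedDays _
  unfold Spec_checkDays
  exact checkDays_eq_alt newDays savedDays
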